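-- pv_equiv track=rewrite | github.com/Wojtke7/Python-projects | Day 35 Rain alert APP/main.py | check_showers_hourly
-- ===== SOURCE A (Python) =====
-- def check_showers_hourly(weathercode):
--     drizzle_hours = []
--     rain_hours = []
--     heavy_rain_hours = []
--     snow_hours = []
--     thunderstorm_hours = []
--
--     for hour_code in weathercode:
--         if 50 < hour_code < 60:
--             drizzle_hours.append(weathercode.index(hour_code) + 8)
--         elif 60 < hour_code < 70:
--             rain_hours.append(weathercode.index(hour_code) + 8)
--         elif 70 < hour_code < 80 or 85 <= hour_code < 87:
--             snow_hours.append(weathercode.index(hour_code) + 8)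
--         elif 80 < hour_code < 85:
--             heavy_rain_hours.append(weathercode.index(hour_code) + 8)
--         elif 94 < hour_code < 100:
--             thunderstorm_hours.append(weathercode.index(hour_code) + 8)
--
--     statement = ""
--
--     if drizzle_hours:
--         drizzle_str = ', '.join(map(str, drizzle_hours))
--         statement += f"Mżawka przewidywana jest w godzinach: {drizzle_str}"
--
--     if rain_hours:
--         rain_str = ', '.join(map(str, rain_hours))
--         statement += f"Deszcz przewidywany jest w godzinach: {rain_str}"
--
--     if heavy_rain_hours:
--         heavy_rain_str = ', '.join(map(str, heavy_rain_hours))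
--         statement += f"Mocny deszcz przewidywany jest w godzinach: {heavy_rain_str}"
--
--     if snow_hours:
--         snow_str = ', '.join(map(str, snow_hours))
--         statement += f"Śnieg przewidywany jest w godzinach: {snow_str}"
--
--     if thunderstorm_hours:
--         thunderstorm_str = ', '.join(map(str, thunderstorm_hours))
--         statement += f"Burza przewidywana jest w godzinach: {thunderstorm_str}"
--
--     return statement
-- ===== SOURCE B (Python) =====
-- def check_showers_hourly(weathercode):
--     categories = [
--         (lambda c: 50 < c < 60, "M\u017cawka przewidywana jest w godzinach: "),
--         (lambda c: 60 < c < 70, "Deszcz przewidywany jest w godzinach: "),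
--         (lambda c: 80 < c < 85, "Mocny deszcz przewidywany jest w godzinach: "),
--         (lambda c: 70 < c < 80 or 85 <= c < 87, "\u015anieg przewidywany jest w godzinach: "),
--         (lambda c: 94 < c < 100, "Burza przewidywana jest w godzinach: "),
--     ]
--     parts = []
--     for pred, label in categories:
--         hours = [weathercode.index(c) + 8 for c in weathercode if pred(c)]
--         if hours:
--             parts.append(label + ", ".join(str(h) for h in hours))
--     return "".join(parts)
-- ===== Notes on version B (the rewrite author's own statement) =====
-- stated objective: alternative
-- what changed: Replaces the single pass with a five-way mutable-list if/elif dispatch plus five separate formatting blocks by a data-driven design: an ordered table of (predicate,label) categories, one filtering scan per category, and one uniform loop assembling the labelled parts joined at the end.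
import Mathlib
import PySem

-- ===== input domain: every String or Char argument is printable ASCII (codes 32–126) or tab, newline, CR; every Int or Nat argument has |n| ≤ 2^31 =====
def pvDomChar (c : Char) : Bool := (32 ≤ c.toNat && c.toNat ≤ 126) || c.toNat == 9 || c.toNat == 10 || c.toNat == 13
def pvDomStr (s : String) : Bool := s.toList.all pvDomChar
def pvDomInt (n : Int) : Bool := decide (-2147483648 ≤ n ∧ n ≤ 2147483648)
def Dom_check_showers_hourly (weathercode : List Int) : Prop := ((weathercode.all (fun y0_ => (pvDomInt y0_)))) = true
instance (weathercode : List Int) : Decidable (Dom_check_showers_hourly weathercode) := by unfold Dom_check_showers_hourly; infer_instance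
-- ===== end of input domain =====

-- ===== PORT A =====
-- B restructures A's if/elif single pass into a data-driven table of (predicate, label)
-- categories, each bucket built by its own filtering scan; same cost, different decomposition.

-- weathercode.index(hour_code) + 8; the element is a member of the list, so index? is
-- always some and the getD default is never used (Python would raise only on a non-member).
def pvIdx8 (weathercode : List Int) (c : Int) : Int :=
  (((PySem.List.index? weathercode c).getD 0 : Nat) : Int) + 8

def check_showers_hourly (weathercode : List Int) : String :=
  let st := weathercode.foldl
    (fun (acc : List Int × List Int × List Int × List Int × List Int) hour_code =>
      let (d, r, h, s, t) := acc
      if 50 < hour_code ∧ hour_code < 60 then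
        (d ++ [pvIdx8 weathercode hour_code], r, h, s, t)
      else if 60 < hour_code ∧ hour_code < 70 then
        (d, r ++ [pvIdx8 weathercode hour_code], h, s, t)
      else if (70 < hour_code ∧ hour_code < 80) ∨ (85 ≤ hour_code ∧ hour_code < 87) then
        (d, r, h, s ++ [pvIdx8 weathercode hour_code], t)
      else if 80 < hour_code ∧ hour_code < 85 then
        (d, r, h ++ [pvIdx8 weathercode hour_code], s, t)
      else if 94 < hour_code ∧ hour_code < 100 then
        (d, r, h, s, t ++ [pvIdx8 weathercode hour_code])
      else (d, r, h, s, t))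
    ([], [], [], [], [])
  let (drizzle_hours, rain_hours, heavy_rain_hours, snow_hours, thunderstorm_hours) := st
  let statement := ""
  let statement := if drizzle_hours ≠ [] then
      statement ++ "Mżawka przewidywana jest w godzinach: "
        ++ PySem.Str.join ", " (drizzle_hours.map PySem.Int.toStr)
    else statement
  let statement := if rain_hours ≠ [] then
      statement ++ "Deszcz przewidywany jest w godzinach: "
        ++ PySem.Str.join ", " (rain_hours.map PySem.Int.toStr)
    else statement
  let statement := if heavy_rain_hours ≠ [] then
      statement ++ "Mocny deszcz przewidywany jest w godzinach: "
        ++ PySem.Str.join ", " (heavy_rain_hours.map PySem.Int.toStr)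
    else statement
  let statement := if snow_hours ≠ [] then
      statement ++ "Śnieg przewidywany jest w godzinach: "
        ++ PySem.Str.join ", " (snow_hours.map PySem.Int.toStr)
    else statement
  let statement := if thunderstorm_hours ≠ [] then
      statement ++ "Burza przewidywana jest w godzinach: "
        ++ PySem.Str.join ", " (thunderstorm_hours.map PySem.Int.toStr)
    else statement
  statement

-- ===== PORT B =====
def pvCategories : List ((Int → Bool) × String) :=
  [ (fun c => decide (50 < c ∧ c < 60), "Mżawka przewidywana jest w godzinach: "),
    (fun c => decide (60 < c ∧ c < 70), "Deszcz przewidywany jest w godzinach: "),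
    (fun c => decide (80 < c ∧ c < 85), "Mocny deszcz przewidywany jest w godzinach: "),
    (fun c => decide ((70 < c ∧ c < 80) ∨ (85 ≤ c ∧ c < 87)), "Śnieg przewidywany jest w godzinach: "),
    (fun c => decide (94 < c ∧ c < 100), "Burza przewidywana jest w godzinach: ") ]

def check_showers_hourly_alt (weathercode : List Int) : String :=
  let parts := pvCategories.foldl
    (fun (parts : List String) pl =>
      let hours := (weathercode.filter pl.1).map (pvIdx8 weathercode)
      if hours ≠ [] then
        parts ++ [pl.2 ++ PySem.Str.join ", " (hours.map PySem.Int.toStr)]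
      else parts)
    []
  PySem.Str.join "" parts

-- ===== PRECONDITION & SPEC =====

def Spec_check_showers_hourly (weathercode : List Int) (out : String) : Prop := out = check_showers_hourly_alt weathercode
instance (weathercode : List Int) (out : String) : Decidable (Spec_check_showers_hourly weathercode out) := by unfold Spec_check_showers_hourly; infer_instance

-- ===== CLAIM (what is proved, stated in full; the proofs are below) =====
def Claim_equal_check_showers_hourly : Prop := ∀ (weathercode : List Int), Dom_check_showers_hourly weathercode → Spec_check_showers_hourly weathercode (check_showers_hourly weathercode)

-- ===== LEMMAS AND PROOFS =====
theorem joinEmptyNil : PySem.Str.join "" [] = "" := by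
  simp [PySem.Str.join, PySem.Chars.join, List.intercalate]

theorem joinEmptyCons (a : String) (l : List String) :
    PySem.Str.join "" (a :: l) = a ++ PySem.Str.join "" l := by
  cases l with
  | nil => simp [PySem.Str.join, PySem.Chars.join, List.intercalate]
  | cons b t => simp [PySem.Str.join, PySem.Chars.join_cons_cons]

-- A's single pass with the if/elif chain fills the five buckets exactly as B's
-- five independent filtering scans do (the five code ranges are pairwise disjoint).
theorem loopA (w l : List Int) (d r h s t : List Int) :
    l.foldl
      (fun (acc : List Int × List Int × List Int × List Int × List Int) hour_code =>
        let (d, r, h, s, t) := acc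
        if 50 < hour_code ∧ hour_code < 60 then
          (d ++ [pvIdx8 w hour_code], r, h, s, t)
        else if 60 < hour_code ∧ hour_code < 70 then
          (d, r ++ [pvIdx8 w hour_code], h, s, t)
        else if (70 < hour_code ∧ hour_code < 80) ∨ (85 ≤ hour_code ∧ hour_code < 87) then
          (d, r, h, s ++ [pvIdx8 w hour_code], t)
        else if 80 < hour_code ∧ hour_code < 85 then
          (d, r, h ++ [pvIdx8 w hour_code], s, t)
        else if 94 < hour_code ∧ hour_code < 100 then
          (d, r, h, s, t ++ [pvIdx8 w hour_code])
        else (d, r, h, s, t))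
      (d, r, h, s, t) =
    (d ++ ((l.filter (fun c => decide (50 < c ∧ c < 60))).map (pvIdx8 w)),
     r ++ ((l.filter (fun c => decide (60 < c ∧ c < 70))).map (pvIdx8 w)),
     h ++ ((l.filter (fun c => decide (80 < c ∧ c < 85))).map (pvIdx8 w)),
     s ++ ((l.filter (fun c => decide ((70 < c ∧ c < 80) ∨ (85 ≤ c ∧ c < 87)))).map (pvIdx8 w)),
     t ++ ((l.filter (fun c => decide (94 < c ∧ c < 100))).map (pvIdx8 w))) := by
  induction l generalizing d r h s t with
  | nil => simp
  | cons c cs ih =>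
    simp only [List.foldl_cons, List.filter_cons]
    by_cases h1 : 50 < c ∧ c < 60
    · simp only [if_pos h1, ih]
      have h2 : ¬ (60 < c ∧ c < 70) := by omega
      have h3 : ¬ ((70 < c ∧ c < 80) ∨ (85 ≤ c ∧ c < 87)) := by omega
      have h4 : ¬ (80 < c ∧ c < 85) := by omega
      have h5 : ¬ (94 < c ∧ c < 100) := by omega
      simp [h1, h2, h3, h4, h5]
    · by_cases h2 : 60 < c ∧ c < 70
      · simp only [if_neg h1, if_pos h2, ih]
        have h3 : ¬ ((70 < c ∧ c < 80) ∨ (85 ≤ c ∧ c < 87)) := by omega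
        have h4 : ¬ (80 < c ∧ c < 85) := by omega
        have h5 : ¬ (94 < c ∧ c < 100) := by omega
        simp [h1, h2, h3, h4, h5]
      · by_cases h3 : (70 < c ∧ c < 80) ∨ (85 ≤ c ∧ c < 87)
        · simp only [if_neg h1, if_neg h2, if_pos h3, ih]
          have h4 : ¬ (80 < c ∧ c < 85) := by omega
          have h5 : ¬ (94 < c ∧ c < 100) := by omega
          simp [h1, h2, h3, h4, h5]
        · by_cases h4 : 80 < c ∧ c < 85
          · simp only [if_neg h1, if_neg h2, if_neg h3, if_pos h4, ih]
            have h5 : ¬ (94 < c ∧ c < 100) := by omega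
            simp [h1, h2, h3, h4, h5]
          · by_cases h5 : 94 < c ∧ c < 100
            · simp only [if_neg h1, if_neg h2, if_neg h3, if_neg h4, if_pos h5, ih]
              simp [h1, h2, h3, h4, h5]
            · simp only [if_neg h1, if_neg h2, if_neg h3, if_neg h4, if_neg h5, ih]
              simp [h1, h2, h3, h4, h5]

-- ===== VERDICT (by name: the statement is the Claim_ definition above) =====
set_option maxHeartbeats 1000000 in
theorem check_showers_hourly_spec : Claim_equal_check_showers_hourly := by
  intro w _
  unfold Spec_check_showers_hourly check_showers_hourly check_showers_hourly_alt
  rw [loopA]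
  simp only [pvCategories, List.foldl_cons, List.foldl_nil, List.nil_append,
    String.append_assoc]
  generalize (List.map (pvIdx8 w) (List.filter (fun c => decide (50 < c ∧ c < 60)) w)) = D
  generalize (List.map (pvIdx8 w) (List.filter (fun c => decide (60 < c ∧ c < 70)) w)) = R
  generalize (List.map (pvIdx8 w) (List.filter (fun c => decide (80 < c ∧ c < 85)) w)) = H
  generalize (List.map (pvIdx8 w) (List.filter (fun c => decide ((70 < c ∧ c < 80) ∨ (85 ≤ c ∧ c < 87))) w)) = S
  generalize (List.map (pvIdx8 w) (List.filter (fun c => decide (94 < c ∧ c < 100)) w)) = T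
  split_ifs <;> simp [joinEmptyCons, joinEmptyNil, String.append_assoc]
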